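-- pv_equiv track=rewrite | github.com/meerk40t/meerk40t | meerk40t/grbl/esp3d_upload.py | validate_filename_8_3
-- ===== SOURCE A (Python) =====
-- def validate_filename_8_3(filename):
--     """
--     Validate if filename follows 8.3 convention.
--
--     Args:
--         filename: Filename to validate
--
--     Returns:
--         bool: True if valid 8.3 format
--     """
--     if not filename or "." not in filename:
--         return False
--
--     parts = filename.rsplit(".", 1)
--     if len(parts) != 2:
--         return False
--
--     name, ext = parts
--
--     # Check length constraints
--     if len(name) > 8 or len(ext) > 3:
--         return False
--
--     # Check for invalid characters
--     invalid_chars = set(' \\/:*?"<>|')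
--     if any(c in invalid_chars for c in filename):
--         return False
--
--     return True
-- ===== SOURCE B (Python) =====
-- def validate_filename_8_3(filename):
--     """Single forward pass: reject invalid chars as they appear, track the
--     last dot index, then check both length constraints arithmetically."""
--     dot = -1
--     for i, c in enumerate(filename):
--         if c in ' \\/:*?"<>|':
--             return False
--         if c == '.':
--             dot = i
--     if dot < 0:
--         return False
--     return dot <= 8 and len(filename) - dot - 1 <= 3
-- ===== Notes on version B (the rewrite author's own statement) =====
-- stated objective: simpler
-- what changed: Replaces rsplit + separate length checks + a second any() scan over a char set with one forward pass that rejects invalid characters on sight and tracks the last dot index, finishing with two arithmetic length checks.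
import Mathlib
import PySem

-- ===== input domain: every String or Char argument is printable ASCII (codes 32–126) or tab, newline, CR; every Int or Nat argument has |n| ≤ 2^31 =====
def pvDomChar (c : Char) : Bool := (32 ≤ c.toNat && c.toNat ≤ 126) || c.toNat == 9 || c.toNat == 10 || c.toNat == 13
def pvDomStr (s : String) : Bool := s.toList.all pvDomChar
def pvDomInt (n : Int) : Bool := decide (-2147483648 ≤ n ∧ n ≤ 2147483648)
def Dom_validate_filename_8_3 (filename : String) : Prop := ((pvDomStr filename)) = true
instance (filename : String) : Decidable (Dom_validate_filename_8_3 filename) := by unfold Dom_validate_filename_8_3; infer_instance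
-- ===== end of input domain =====

-- B replaces A's rsplit + separate length checks + second any() scan by one forward pass that
-- tracks the last dot index (objective: simpler, same O(n) cost).

-- ===== PORT A =====
-- invalid_chars = set(' \\/:*?"<>|')
def pvInvalidSet : PySem.Set Char := PySem.Set.ofList (" \\/:*?\"<>|".toList)

def validate_filename_8_3 (filename : String) : Bool :=
  let cs := filename.toList
  -- 'if not filename or "." not in filename: return False'  ("." in filename is a
  -- single-character substring test, so it is exactly char membership; exact here)
  if cs.isEmpty || !(cs.contains '.') then false
  else
    -- parts = filename.rsplit(".", 1): with '.' present this always yields exactly 2 parts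
    -- (the len(parts) != 2 branch is unreachable), splitting at the LAST dot; exact here.
    let r := cs.reverse.idxOf '.'
    let idx := cs.length - 1 - r
    let name := cs.take idx
    let ext := cs.drop (idx + 1)
    if name.length > 8 ∨ ext.length > 3 then false
    else if cs.any (fun c => pvInvalidSet.contains c) then false
    else true

-- ===== PORT B =====
-- the for-loop over enumerate(filename): returns none at an early 'return False',
-- otherwise some of the final value of 'dot' (initially -1)
def pvAltLoop : List Char → Int → Int → Option Int
  | [], _, dot => some dot
  | c :: rest, i, dot =>
    if (" \\/:*?\"<>|".toList).contains c then none
    else pvAltLoop rest (i + 1) (if c = '.' then i else dot)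

def validate_filename_8_3_alt (filename : String) : Bool :=
  let cs := filename.toList
  match pvAltLoop cs 0 (-1) with
  | none => false
  | some dot =>
    if dot < 0 then false
    else decide (dot ≤ 8 ∧ (cs.length : Int) - dot - 1 ≤ 3)

-- ===== PRECONDITION & SPEC =====
def Spec_validate_filename_8_3 (filename : String) (out : Bool) : Prop := out = validate_filename_8_3_alt filename
instance (filename : String) (out : Bool) : Decidable (Spec_validate_filename_8_3 filename out) := by unfold Spec_validate_filename_8_3; infer_instance

-- ===== CLAIM (what is proved, stated in full; the proofs are below) =====
def Claim_equal_validate_filename_8_3 : Prop := ∀ (filename : String), Dom_validate_filename_8_3 filename → Spec_validate_filename_8_3 filename (validate_filename_8_3 filename)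

-- ===== LEMMAS AND PROOFS =====

-- the invalid-character list, and the final value of 'dot' when B's loop runs to the end
def pvInvList : List Char := " \\/:*?\"<>|".toList

def pvLastDot : List Char → Int → Int → Int
  | [], _, dot => dot
  | c :: rest, i, dot => pvLastDot rest (i + 1) (if c = '.' then i else dot)

theorem invSet_contains (c : Char) :
    pvInvalidSet.contains c = pvInvList.contains c := by
  have h : pvInvalidSet = pvInvList := by decide
  rw [h, PySem.Set.contains_eq_listContains]

theorem altLoop_char (cs : List Char) (i dot : Int) :
    pvAltLoop cs i dot =
      if cs.any (fun c => pvInvList.contains c) then none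
      else some (pvLastDot cs i dot) := by
  induction cs generalizing i dot with
  | nil => simp [pvAltLoop, pvLastDot]
  | cons c rest ih =>
    have hl : (" \\/:*?\"<>|".toList) = pvInvList := rfl
    rw [pvAltLoop, pvLastDot, List.any_cons, hl]
    cases hc : pvInvList.contains c with
    | true => simp
    | false => simp only [Bool.false_or, if_false, Bool.false_eq_true, ih]

theorem lastDot_not_mem (cs : List Char) (i dot : Int) (h : '.' ∉ cs) :
    pvLastDot cs i dot = dot := by
  induction cs generalizing i dot with
  | nil => rfl
  | cons c rest ih =>
    simp only [List.mem_cons, not_or] at h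
    rw [pvLastDot, if_neg (fun e => h.1 e.symm), ih _ _ h.2]

theorem lastDot_snoc (cs : List Char) (c : Char) (i dot : Int) :
    pvLastDot (cs ++ [c]) i dot =
      if c = '.' then i + cs.length else pvLastDot cs i dot := by
  induction cs generalizing i dot with
  | nil => simp [pvLastDot]
  | cons d rest ih =>
    simp only [List.cons_append, pvLastDot, ih, List.length_cons]
    split_ifs <;> push_cast <;> ring_nf

theorem lastDot_mem (cs : List Char) (i dot : Int) (h : '.' ∈ cs) :
    pvLastDot cs i dot = i + cs.length - 1 - cs.reverse.idxOf '.' := by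
  induction cs using List.reverseRecOn generalizing i dot with
  | nil => simp at h
  | append_singleton rest c ih =>
    rw [lastDot_snoc]
    by_cases hc : c = '.'
    · subst hc
      simp [List.reverse_append, List.idxOf_cons_self]
      ring
    · have hmem : '.' ∈ rest := by
        rcases List.mem_append.mp h with h1 | h1
        · exact h1
        · simp at h1; exact absurd h1.symm hc
      have hlt : rest.reverse.idxOf '.' < rest.reverse.length :=
        List.idxOf_lt_length_of_mem (by simpa using hmem)
      rw [if_neg hc, ih _ _ hmem]
      simp only [List.reverse_append, List.reverse_singleton, List.singleton_append,
        List.idxOf_cons, List.length_append, List.length_singleton]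
      rw [show (c == '.') = false from beq_eq_false_iff_ne.mpr hc]
      simp only [cond_false]
      simp at hlt
      push_cast
      omega

-- ===== VERDICT (by name: the statement is the Claim_ definition above) =====
theorem validate_filename_8_3_spec : Claim_equal_validate_filename_8_3 := by
  intro fn _
  unfold Spec_validate_filename_8_3 validate_filename_8_3 validate_filename_8_3_alt
  simp only [funext invSet_contains]
  generalize fn.toList = cs
  rw [altLoop_char]
  by_cases hdot : '.' ∈ cs
  · have hne : cs ≠ [] := by rintro rfl; simp at hdot
    have hr : cs.reverse.idxOf '.' < cs.length := by
      have := List.idxOf_lt_length_of_mem (by simpa using hdot : '.' ∈ cs.reverse)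
      simpa using this
    rw [lastDot_mem _ _ _ hdot]
    have hcont : cs.contains '.' = true := by simpa using hdot
    simp only [List.isEmpty_iff, hne, hcont, Bool.not_true, Bool.or_false,
      if_false, List.length_take, List.length_drop]
    cases hinv : cs.any (fun c => pvInvList.contains c) with
    | true => split_ifs <;> simp_all
    | false =>
      simp only [Bool.false_eq_true, if_false]
      have hge : ¬ ((0 : Int) + cs.length - 1 - cs.reverse.idxOf '.' < 0) := by omega
      rw [if_neg hge]
      split_ifs with h1
      · rw [eq_comm, decide_eq_false_iff_not]
        omega
      · rw [eq_comm, decide_eq_true_eq]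
        omega
  · have hcont : cs.contains '.' = false := by simpa using hdot
    rw [lastDot_not_mem _ _ _ hdot]
    simp only [hcont, Bool.not_false, Bool.or_true, if_true]
    cases hinv : cs.any (fun c => pvInvList.contains c) with
    | true => rfl
    | false => simp
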